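-- pv_equiv track=rewrite | github.com/easycodinggithub/Programmers_Python | 콜라 문제.py | solution
-- ===== SOURCE A (Python) =====
-- def solution(a, b, n):
--     answer = 0
--     while True:
--         if (n < a):
--             break
--         n -= a
--         answer += b
--         n += b
--     return answer
-- ===== SOURCE B (Python) =====
-- def solution(a, b, n):
--     # Closed form: each exchange round spends a bottles and gets b back,
--     # a net loss of (a-b); rounds = (n-a)//(a-b)+1 if n >= a else 0.
--     if n < a:
--         return 0
--     return ((n - a) // (a - b) + 1) * b
-- ===== Notes on version B (the rewrite author's own statement) =====
-- stated objective: alternative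
-- what changed: Replaced the bottle-by-bottle exchange simulation loop with a direct closed-form count of exchange rounds via floor division (intended as faster; a timing run could not confirm a ratio at measurable sizes).
import Mathlib
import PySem

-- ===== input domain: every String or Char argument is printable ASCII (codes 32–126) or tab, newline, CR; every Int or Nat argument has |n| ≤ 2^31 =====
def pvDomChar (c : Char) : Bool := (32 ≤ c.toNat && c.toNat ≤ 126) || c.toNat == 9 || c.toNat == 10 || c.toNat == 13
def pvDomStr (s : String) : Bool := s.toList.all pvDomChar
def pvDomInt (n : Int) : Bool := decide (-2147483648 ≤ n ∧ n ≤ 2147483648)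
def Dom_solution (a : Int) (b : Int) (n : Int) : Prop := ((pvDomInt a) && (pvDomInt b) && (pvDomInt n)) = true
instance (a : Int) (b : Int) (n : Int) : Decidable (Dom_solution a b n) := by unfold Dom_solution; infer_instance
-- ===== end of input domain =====

-- B replaces A's round-by-round exchange simulation loop with a direct closed-form floor-division formula (alternative algorithm).

-- ===== PORT A =====
-- The while-True loop, with fuel making the recursion total; on every input
-- satisfying Pre_solution the fuel is large enough, so the port is faithful there.
def solLoop : Nat → Int → Int → Int → Int → Int
  | 0, _, _, _, answer => answer
  | fuel+1, a, b, n, answer =>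
      if n < a then answer
      else solLoop fuel a b (n - a + b) (answer + b)

def solution (a : Int) (b : Int) (n : Int) : Int :=
  solLoop (n.natAbs + a.natAbs + b.natAbs + 1) a b n 0

-- ===== PORT B =====
def solution_alt (a : Int) (b : Int) (n : Int) : Int :=
  if n < a then 0
  else (PySem.Int.floordiv (n - a) (a - b) + 1) * b

-- ===== PRECONDITION & SPEC =====
-- Pre_ excludes exactly the inputs (n ≥ a and b ≥ a) on which A's while-loop never terminates.
def Pre_solution (a : Int) (b : Int) (n : Int) : Prop := n < a ∨ b < a
instance (a : Int) (b : Int) (n : Int) : Decidable (Pre_solution a b n) := by unfold Pre_solution; infer_instance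
def pvWitness_solution : Int × Int × Int := (2, 1, 20)

def Spec_solution (a : Int) (b : Int) (n : Int) (out : Int) : Prop := out = solution_alt a b n
instance (a : Int) (b : Int) (n : Int) (out : Int) : Decidable (Spec_solution a b n out) := by unfold Spec_solution; infer_instance

-- ===== CLAIM (what is proved, stated in full; the proofs are below) =====
def Claim_equal_solution : Prop := ∀ (a : Int) (b : Int) (n : Int), Dom_solution a b n → Pre_solution a b n → Spec_solution a b n (solution a b n)

-- ===== LEMMAS AND PROOFS =====

-- One exchange round: the closed form satisfies the loop's step equation.
theorem alt_step (a b n : Int) (hb : b < a) (hna : ¬ n < a) :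
    solution_alt a b n = b + solution_alt a b (n - a + b) := by
  have hd : (0:Int) < a - b := by omega
  unfold solution_alt
  rw [if_neg hna]
  by_cases h2 : n - a + b < a
  · rw [if_pos h2]
    have h0 : PySem.Int.floordiv (n - a) (a - b) = 0 := by
      rw [PySem.Int.floordiv_eq_iff_of_pos hd]
      constructor <;> nlinarith
    rw [h0]; ring
  · rw [if_neg h2]
    rw [PySem.Int.floordiv_eq_ediv_of_pos hd, PySem.Int.floordiv_eq_ediv_of_pos hd]
    have he : n - a + b - a = (n - a) + (-1) * (a - b) := by ring
    rw [he, Int.add_mul_ediv_right _ _ (by omega : a - b ≠ 0)]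
    ring

theorem solLoop_eq (a b : Int) (hb : b < a) :
    ∀ (fuel : Nat) (n ans : Int), n - a < (fuel : Int) * (a - b) →
      solLoop fuel a b n ans = ans + solution_alt a b n := by
  intro fuel
  induction fuel with
  | zero =>
      intro n ans h
      simp only [Nat.cast_zero, zero_mul] at h
      have hna : n < a := by omega
      simp [solLoop, solution_alt, hna]
  | succ k ih =>
      intro n ans h
      by_cases hna : n < a
      · simp [solLoop, solution_alt, hna]
      · have hexp : ((k + 1 : Nat) : Int) * (a - b) = (k : Int) * (a - b) + (a - b) := by
          push_cast; ring
        have h' : (n - a + b) - a < (k : Int) * (a - b) := by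
          rw [hexp] at h; omega
        simp only [solLoop, if_neg hna]
        rw [ih (n - a + b) (ans + b) h', alt_step a b n hb hna]
        ring

-- ===== VERDICT (by name: the statement is the Claim_ definition above) =====
theorem solution_spec : Claim_equal_solution := by
  unfold Claim_equal_solution
  intro a b n _ hpre
  unfold Spec_solution solution
  by_cases hna : n < a
  · cases h : n.natAbs + a.natAbs + b.natAbs + 1 with
    | zero => omega
    | succ k => simp [solLoop, solution_alt, hna]
  · have hb : b < a := by unfold Pre_solution at hpre; omega
    have hd : (0:Int) < a - b := by omega
    have hfuel : n - a < ((n.natAbs + a.natAbs + b.natAbs + 1 : Nat) : Int) * (a - b) := by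
      have h1 : n - a < ((n.natAbs + a.natAbs + b.natAbs + 1 : Nat) : Int) := by
        omega
      calc n - a < ((n.natAbs + a.natAbs + b.natAbs + 1 : Nat) : Int) := h1
        _ ≤ _ := by nlinarith [Int.natCast_nonneg (n.natAbs + a.natAbs + b.natAbs + 1)]
    rw [solLoop_eq a b hb _ n 0 hfuel]
    ring
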